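-- pv_equiv track=rewrite | github.com/Mushi0/Advent-of-Code---Save-Christmas-2023 | Python/D12_1.py | check_if_match
-- ===== SOURCE A (Python) =====
-- def check_if_match(record, contiguous_groups):
--     i = 0
--     counts = []
--     while i < len(record):
--         count = 0
--         while i < len(record) and record[i] == '#':
--             count += 1
--             i += 1
--         if count > 0:
--             counts.append(count)
--         i += 1
--     return tuple(counts) == contiguous_groups
-- ===== SOURCE B (Python) =====
-- def check_if_match(record, contiguous_groups):
--     normalized = ''.join(c if c == '#' else '.' for c in record)
--     runs = tuple(len(part) for part in normalized.split('.') if part)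
--     return runs == contiguous_groups
-- ===== Notes on version B (the rewrite author's own statement) =====
-- stated objective: faster
-- what changed: Replaces the index-bookkeeping nested while-loops with a declarative pipeline: normalize every non-'#' char to '.', split on '.', and compare the lengths of the nonempty pieces to the groups; the run-finding is done by str.split in C instead of a per-character Python loop.
import Mathlib
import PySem

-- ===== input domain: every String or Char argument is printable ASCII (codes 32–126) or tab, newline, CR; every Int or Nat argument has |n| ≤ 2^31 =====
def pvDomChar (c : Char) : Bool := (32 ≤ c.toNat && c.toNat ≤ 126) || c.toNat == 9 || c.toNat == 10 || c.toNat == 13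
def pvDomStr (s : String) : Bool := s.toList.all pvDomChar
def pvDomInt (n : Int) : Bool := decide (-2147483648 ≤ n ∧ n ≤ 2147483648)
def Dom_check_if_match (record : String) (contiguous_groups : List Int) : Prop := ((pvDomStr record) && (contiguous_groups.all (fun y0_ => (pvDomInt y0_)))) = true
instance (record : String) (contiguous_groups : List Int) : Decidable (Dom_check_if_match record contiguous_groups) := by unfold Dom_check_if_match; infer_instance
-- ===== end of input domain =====

-- B replaces A's nested index-bookkeeping while-loops by a normalize/split/compare pipeline (objective: idiomatic).

-- ===== PORT A =====
-- inner 'while i < len(record) and record[i] == "#"': returns (count of leading '#', remaining chars)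
def pvCountHash : List Char → Nat × List Char
  | [] => (0, [])
  | c :: cs =>
    if c = '#' then
      let r := pvCountHash cs
      (r.1 + 1, r.2)
    else (0, c :: cs)

theorem pvCountHash_snd_le (l : List Char) : (pvCountHash l).2.length ≤ l.length := by
  induction l with
  | nil => simp [pvCountHash]
  | cons c cs ih =>
    by_cases h : c = '#' <;> simp [pvCountHash, h]
    omega

-- outer 'while i < len(record)': one iteration = inner count, optional append, then 'i += 1' (drop 1)
def pvLoopA : List Char → List Int → List Int
  | [], counts => counts
  | c :: cs, counts =>
    let r := pvCountHash (c :: cs)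
    pvLoopA (r.2.drop 1) (if r.1 > 0 then counts ++ [(r.1 : Int)] else counts)
termination_by l _ => l.length
decreasing_by
  simp only [List.length_drop]
  have := pvCountHash_snd_le (c :: cs)
  simp [List.length_cons] at this ⊢
  omega

def check_if_match (record : String) (contiguous_groups : List Int) : Bool :=
  decide (pvLoopA record.toList [] = contiguous_groups)

-- ===== PORT B =====
-- ''.join(c if c == '#' else '.' for c in record)
def pvNorm (c : Char) : Char := if c = '#' then '#' else '.'

def check_if_match_alt (record : String) (contiguous_groups : List Int) : Bool :=
  let normalized := record.toList.map pvNorm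
  -- str.split('.') ported as List.splitOn '.' (exact for a single-char separator); 'if part' keeps nonempty pieces
  let runs := ((normalized.splitOn '.').filter (fun p => !p.isEmpty)).map (fun p => (p.length : Int))
  decide (runs = contiguous_groups)

-- ===== PRECONDITION & SPEC =====
def Spec_check_if_match (record : String) (contiguous_groups : List Int) (out : Bool) : Prop := out = check_if_match_alt record contiguous_groups
instance (record : String) (contiguous_groups : List Int) (out : Bool) : Decidable (Spec_check_if_match record contiguous_groups out) := by unfold Spec_check_if_match; infer_instance

-- ===== CLAIM (what is proved, stated in full; the proofs are below) =====
def Claim_equal_check_if_match : Prop := ∀ (record : String) (contiguous_groups : List Int), Dom_check_if_match record contiguous_groups → Spec_check_if_match record contiguous_groups (check_if_match record contiguous_groups)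

-- ===== LEMMAS AND PROOFS =====

-- B's run list computed directly on a char list
def pvBruns (l : List Char) : List Int :=
  (((l.map pvNorm).splitOn '.').filter (fun p => !p.isEmpty)).map (fun p => (p.length : Int))

-- the tail of the split after the first '#'-run: nothing if the rest is empty, else the split of the rest's tail
def pvTail (r : List Char) : List (List Char) :=
  match r with
  | [] => []
  | _ :: rs => (rs.map pvNorm).splitOn '.'

theorem pvFirstRun (l : List Char) :
    (l.map pvNorm).splitOn '.' =
      List.replicate (pvCountHash l).1 '#' :: pvTail (pvCountHash l).2 := by
  induction l with
  | nil => simp [pvCountHash, pvTail, List.splitOn, List.splitOnP_nil]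
  | cons c cs ih =>
    by_cases h : c = '#'
    · subst h
      simp only [List.map_cons, pvNorm, List.splitOn, List.splitOnP_cons] at ih ⊢
      simp only [beq_iff_eq]
      rw [show (List.splitOnP (fun c => c == '.') (cs.map pvNorm)) = _ from ih]
      simp [pvCountHash, List.replicate_succ]
    · simp only [List.map_cons, pvNorm, if_neg h, List.splitOn, List.splitOnP_cons]
      simp [pvCountHash, h, pvTail, List.splitOn]

theorem pvBruns_nil : pvBruns [] = [] := by decide

theorem pvBruns_step (l : List Char) :
    pvBruns l = (if (pvCountHash l).1 > 0 then [((pvCountHash l).1 : Int)] else [])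
      ++ pvBruns ((pvCountHash l).2.drop 1) := by
  unfold pvBruns
  rw [pvFirstRun l]
  rcases hr : (pvCountHash l).2 with _ | ⟨r, rs⟩ <;>
    rcases hn : (pvCountHash l).1 with _ | n <;>
      simp [pvTail, List.splitOn, List.splitOnP_nil, List.filter]

theorem pvLoopA_eq (l : List Char) (counts : List Int) :
    pvLoopA l counts = counts ++ pvBruns l := by
  match l with
  | [] => simp [pvLoopA, pvBruns_nil]
  | c :: cs =>
    rw [pvLoopA]
    have ih := pvLoopA_eq ((pvCountHash (c :: cs)).2.drop 1)
      (if (pvCountHash (c :: cs)).1 > 0 then counts ++ [((pvCountHash (c :: cs)).1 : Int)] else counts)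
    rw [ih, pvBruns_step (c :: cs)]
    split_ifs <;> simp
termination_by l.length
decreasing_by
  simp only [List.length_drop]
  have := pvCountHash_snd_le (c :: cs)
  simp [List.length_cons] at this ⊢
  omega

-- ===== VERDICT (by name: the statement is the Claim_ definition above) =====
theorem check_if_match_spec : Claim_equal_check_if_match := by
  intro record contiguous_groups _
  unfold Spec_check_if_match check_if_match check_if_match_alt
  rw [pvLoopA_eq]
  simp [pvBruns]
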